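-- pv_equiv track=rewrite | github.com/sistemas-galdino/PMC-OS-FIRST | scripts/match_galdino.py | match_pessoa_como_empresa
-- ===== SOURCE A (Python) =====
-- import json, re, unicodedata
--
-- def norm(s):
--     if not s: return ''
--     s = unicodedata.normalize('NFKD', s)
--     s = ''.join(c for c in s if not unicodedata.combining(c))
--     return s.lower().strip()
--
-- def match_pessoa_como_empresa(pessoa_n, clientes):
--     if not pessoa_n: return None
--     tokens = pessoa_n.split()
--     if len(tokens) < 2:
--         if len(pessoa_n) < 4: return None
--         for c in clientes:
--             ne = norm(c['nome_empresa'])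
--             if ne == 'n/a': continue
--             if pessoa_n in ne: return c
--         return None
--     first, last = tokens[0], tokens[-1]
--     for c in clientes:
--         ne = norm(c['nome_empresa'])
--         if ne == 'n/a': continue
--         t = ne.split()
--         if first in t and last in t: return c
--     for c in clientes:
--         ne = norm(c['nome_empresa'])
--         if ne == 'n/a': continue
--         if first in ne and last in ne and len(first) > 3 and len(last) > 3: return c
--     return None
-- ===== SOURCE B (Python) =====
-- import unicodedata
--
-- def norm(s):
--     if not s: return ''
--     s = unicodedata.normalize('NFKD', s)
--     s = ''.join(c for c in s if not unicodedata.combining(c))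
--     return s.lower().strip()
--
-- def match_pessoa_como_empresa(pessoa_n, clientes):
--     if not pessoa_n: return None
--     tokens = pessoa_n.split()
--     if len(tokens) < 2:
--         if len(pessoa_n) < 4: return None
--         return next((c for c in clientes
--                      if norm(c['nome_empresa']) != 'n/a'
--                      and pessoa_n in norm(c['nome_empresa'])), None)
--     first, last = tokens[0], tokens[-1]
--     cand = None
--     for c in clientes:
--         ne = norm(c['nome_empresa'])
--         if ne == 'n/a': continue
--         t = ne.split()
--         if first in t and last in t:
--             return c
--         if cand is None and first in ne and last in ne and len(first) > 3 and len(last) > 3: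
--             cand = c
--     return cand
-- ===== Notes on version B (the rewrite author's own statement) =====
-- stated objective: alternative
-- what changed: The multi-token branch's two sequential scans over clientes are fused into one loop that returns a whole-token match immediately and records only the first substring candidate, and the single-token branch becomes a next()-over-generator (find-first); same O(n) cost, one pass instead of two.
import Mathlib
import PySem

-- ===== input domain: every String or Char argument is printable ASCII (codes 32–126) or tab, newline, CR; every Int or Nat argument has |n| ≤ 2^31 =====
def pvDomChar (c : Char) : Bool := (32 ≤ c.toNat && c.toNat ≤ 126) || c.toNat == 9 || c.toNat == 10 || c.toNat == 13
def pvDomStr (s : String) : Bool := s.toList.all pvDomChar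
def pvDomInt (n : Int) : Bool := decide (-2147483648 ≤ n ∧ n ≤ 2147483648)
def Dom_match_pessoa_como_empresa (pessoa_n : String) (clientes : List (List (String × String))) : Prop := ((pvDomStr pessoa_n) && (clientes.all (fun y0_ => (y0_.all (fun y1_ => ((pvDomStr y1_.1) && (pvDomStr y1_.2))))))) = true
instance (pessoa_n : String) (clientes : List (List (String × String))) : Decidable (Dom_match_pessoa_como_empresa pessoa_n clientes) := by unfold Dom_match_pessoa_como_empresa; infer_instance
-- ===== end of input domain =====

-- ===== PORT A =====
-- B fuses A's two multi-token scans into one pass with a recorded substring candidate,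
-- and writes the single-token scan as find-first; same behaviour, one pass instead of two.
-- On the printable-ASCII domain, NFKD normalisation and combining-mark removal are the
-- identity, so norm(s) is exactly s.lower().strip() (norm('') = '' holds for that too).
def pvNorm (s : String) : String :=
  if s = "" then "" else PySem.Str.strip (PySem.Str.lower s)

-- ne = norm(c['nome_empresa']); the key is present under Pre_ (getD "" never read inside Pre_)
def pvGetNE (c : List (String × String)) : String :=
  pvNorm ((PySem.Dict.get? (PySem.Dict.mk c) "nome_empresa").getD "")

-- A, single-token branch: first client whose ne ≠ 'n/a' contains pessoa_n as substring
def pvLoopSingle (pessoa_n : String) : List (List (String × String)) → Option (List (String × String))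
  | [] => none
  | c :: cs =>
    let ne := pvGetNE c
    if ne = "n/a" then pvLoopSingle pessoa_n cs
    else if PySem.Str.isIn pessoa_n ne then some c
    else pvLoopSingle pessoa_n cs

-- A, first multi-token scan: first and last as whole tokens of ne
def pvLoopTok (first last : String) : List (List (String × String)) → Option (List (String × String))
  | [] => none
  | c :: cs =>
    let ne := pvGetNE c
    if ne = "n/a" then pvLoopTok first last cs
    else
      let t := PySem.Str.split₀ ne
      if first ∈ t ∧ last ∈ t then some c
      else pvLoopTok first last cs

-- A, second multi-token scan: first and last as substrings of ne, both longer than 3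
def pvLoopSub (first last : String) : List (List (String × String)) → Option (List (String × String))
  | [] => none
  | c :: cs =>
    let ne := pvGetNE c
    if ne = "n/a" then pvLoopSub first last cs
    else if PySem.Str.isIn first ne ∧ PySem.Str.isIn last ne ∧
            3 < PySem.Str.len first ∧ 3 < PySem.Str.len last then some c
    else pvLoopSub first last cs

def match_pessoa_como_empresa (pessoa_n : String) (clientes : List (List (String × String))) : Option (List (String × String)) :=
  if pessoa_n = "" then none
  else
    let tokens := PySem.Str.split₀ pessoa_n
    if tokens.length < 2 then
      if PySem.Str.len pessoa_n < 4 then none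
      else pvLoopSingle pessoa_n clientes
    else
      let first := PySem.List.pyGetD tokens 0 ""
      let last := PySem.List.pyGetD tokens (-1) ""
      match pvLoopTok first last clientes with
      | some c => some c
      | none => pvLoopSub first last clientes

-- ===== PORT B =====
-- B, fused multi-token loop: token match returns immediately, first substring match recorded
def pvLoopB (first last : String) (cand : Option (List (String × String))) :
    List (List (String × String)) → Option (List (String × String))
  | [] => cand
  | c :: cs =>
    let ne := pvGetNE c
    if ne = "n/a" then pvLoopB first last cand cs
    else
      let t := PySem.Str.split₀ ne
      if first ∈ t ∧ last ∈ t then some c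
      else if cand = none ∧ PySem.Str.isIn first ne ∧ PySem.Str.isIn last ne ∧
              3 < PySem.Str.len first ∧ 3 < PySem.Str.len last then
        pvLoopB first last (some c) cs
      else pvLoopB first last cand cs

def match_pessoa_como_empresa_alt (pessoa_n : String) (clientes : List (List (String × String))) : Option (List (String × String)) :=
  if pessoa_n = "" then none
  else
    let tokens := PySem.Str.split₀ pessoa_n
    if tokens.length < 2 then
      if PySem.Str.len pessoa_n < 4 then none
      else clientes.find? (fun c => pvGetNE c ≠ "n/a" && PySem.Str.isIn pessoa_n (pvGetNE c))
    else
      pvLoopB (PySem.List.pyGetD tokens 0 "") (PySem.List.pyGetD tokens (-1) "") none clientes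

-- ===== PRECONDITION & SPEC =====
-- Pre_ excludes inputs where a scanned client dict lacks the key 'nome_empresa' (Python
-- raises KeyError there); it also excludes, being closed-form, runs where such a dict is
-- merely unreached because an earlier client already matched (both programs agree there).
def Pre_match_pessoa_como_empresa (pessoa_n : String) (clientes : List (List (String × String))) : Prop :=
  pessoa_n = "" ∨
  ((PySem.Str.split₀ pessoa_n).length < 2 ∧ PySem.Str.len pessoa_n < 4) ∨
  ∀ c ∈ clientes, (PySem.Dict.get? (PySem.Dict.mk c) "nome_empresa").isSome
instance (pessoa_n : String) (clientes : List (List (String × String))) : Decidable (Pre_match_pessoa_como_empresa pessoa_n clientes) := by unfold Pre_match_pessoa_como_empresa; infer_instance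

def pvWitness_match_pessoa_como_empresa : String × (List (List (String × String))) :=
  ("abcd efgh", [[("nome_empresa", "n/a")], [("nome_empresa", "Abcd Efgh Ltda")]])


def Spec_match_pessoa_como_empresa (pessoa_n : String) (clientes : List (List (String × String))) (out : Option (List (String × String))) : Prop := out = match_pessoa_como_empresa_alt pessoa_n clientes
instance (pessoa_n : String) (clientes : List (List (String × String))) (out : Option (List (String × String))) : Decidable (Spec_match_pessoa_como_empresa pessoa_n clientes out) := by unfold Spec_match_pessoa_como_empresa; infer_instance

-- ===== CLAIM (what is proved, stated in full; the proofs are below) =====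
def Claim_equal_match_pessoa_como_empresa : Prop := ∀ (pessoa_n : String) (clientes : List (List (String × String))), Dom_match_pessoa_como_empresa pessoa_n clientes → Pre_match_pessoa_como_empresa pessoa_n clientes → Spec_match_pessoa_como_empresa pessoa_n clientes (match_pessoa_como_empresa pessoa_n clientes)

-- ===== LEMMAS AND PROOFS =====
theorem pvLoopSingle_eq_find? (p : String) (cs : List (List (String × String))) :
    pvLoopSingle p cs = cs.find? (fun c => pvGetNE c ≠ "n/a" && PySem.Str.isIn p (pvGetNE c)) := by
  induction cs with
  | nil => rfl
  | cons c cs ih =>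
    simp only [pvLoopSingle, List.find?]
    by_cases h : pvGetNE c = "n/a"
    · simp [h, ih]
    · cases h2 : PySem.Chars.isIn p.toList (pvGetNE c).toList <;> simp [h, h2, ih]

theorem pvLoopB_eq (first last : String) (cs : List (List (String × String))) :
    ∀ cand, pvLoopB first last cand cs =
      (pvLoopTok first last cs).or (cand.or (pvLoopSub first last cs)) := by
  induction cs with
  | nil => intro cand; cases cand <;> rfl
  | cons c cs ih =>
    intro cand
    simp only [pvLoopB, pvLoopTok, pvLoopSub]
    by_cases hna : pvGetNE c = "n/a"
    · rw [if_pos hna, if_pos hna, if_pos hna]; exact ih cand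
    · rw [if_neg hna, if_neg hna, if_neg hna]
      by_cases htok : first ∈ PySem.Str.split₀ (pvGetNE c) ∧ last ∈ PySem.Str.split₀ (pvGetNE c)
      · rw [if_pos htok, if_pos htok]; rfl
      · rw [if_neg htok, if_neg htok]
        by_cases hsub : PySem.Str.isIn first (pvGetNE c) = true ∧ PySem.Str.isIn last (pvGetNE c) = true ∧
            3 < PySem.Str.len first ∧ 3 < PySem.Str.len last
        · rw [if_pos hsub]
          cases cand with
          | none =>
            rw [if_pos ⟨rfl, hsub⟩, ih (some c)]
            cases pvLoopTok first last cs <;> rfl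
          | some x =>
            rw [if_neg (by rintro ⟨h, -⟩; simp at h), ih (some x)]
            cases pvLoopTok first last cs <;> rfl
        · rw [if_neg hsub, if_neg (fun h => hsub h.2), ih cand]

-- ===== VERDICT (by name: the statement is the Claim_ definition above) =====
theorem match_pessoa_como_empresa_spec : Claim_equal_match_pessoa_como_empresa := by
  intro pessoa_n clientes _ _
  unfold Spec_match_pessoa_como_empresa match_pessoa_como_empresa match_pessoa_como_empresa_alt
  by_cases h0 : pessoa_n = ""
  · simp [h0]
  · simp only [h0, if_false]
    by_cases h1 : (PySem.Str.split₀ pessoa_n).length < 2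
    · simp [h1, pvLoopSingle_eq_find?]
    · simp only [h1, if_false, pvLoopB_eq]
      cases pvLoopTok (PySem.List.pyGetD (PySem.Str.split₀ pessoa_n) 0 "")
        (PySem.List.pyGetD (PySem.Str.split₀ pessoa_n) (-1) "") clientes <;> simp [Option.or]
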